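-- pv_equiv track=rewrite | github.com/band2001/ATP-Tournament-Simulation | functions.py | assignProbability
-- ===== SOURCE A (Python) =====
-- def assignProbability(dic,lis): #assign probability breaks the top 128 players into 16 sub groups by ranking. This probability is later used to simulate matches, giving higher ranking players a higher chance of winning their simulated match
--     player_weight = {}
--     for i in lis:
--         if dic[i][0] <=8: #the top 8 players in the world recive the highest player weight
--             player_weight[i] = 16
--         elif dic[i][0] > 8 and dic[i][0] <= 16:
--             player_weight[i] = 15
--         elif dic[i][0] > 16 and dic[i][0] <= 24:
--             player_weight[i] = 14
--         elif dic[i][0] > 24 and dic[i][0] <= 32: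
--             player_weight[i] = 13
--         elif dic[i][0] > 32 and dic[i][0] <= 40:
--             player_weight[i] = 12
--         elif dic[i][0] > 40 and dic[i][0] <= 48:
--             player_weight[i] = 11
--         elif dic[i][0] > 48 and dic[i][0] <= 56:
--             player_weight[i] = 10
--         elif dic[i][0] > 56 and dic[i][0] <= 64:
--             player_weight[i] = 9
--         elif dic[i][0] > 64 and dic[i][0] <= 72:
--             player_weight[i] = 8
--         elif dic[i][0] > 72 and dic[i][0] <= 80:
--             player_weight[i] = 7
--         elif dic[i][0] > 80 and dic[i][0] <= 88:
--             player_weight[i] = 6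
--         elif dic[i][0] > 88 and dic[i][0] <= 96:
--             player_weight[i] = 5
--         elif dic[i][0] > 96 and dic[i][0] <= 104:
--             player_weight[i] = 4
--         elif dic[i][0] > 104 and dic[i][0] <= 112:
--             player_weight[i] = 3
--         elif dic[i][0] > 112 and dic[i][0] <= 120:
--             player_weight[i] = 2
--         elif dic[i][0] > 120 and dic[i][0] <= 128: #the system is such that if the highest ranked player in the world played the lowest ranked player in the world, there would be a 16/17 percent chance that the top seed would win (see user manual for more information).
--             player_weight[i] = 1
--     return player_weight
-- ===== SOURCE B (Python) =====
-- def assignProbability(dic, lis):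
--     # Binary-search the rank against the 16 bucket boundaries instead of a 16-branch ladder.
--     thresholds = [8, 16, 24, 32, 40, 48, 56, 64, 72, 80, 88, 96, 104, 112, 120, 128]
--     player_weight = {}
--     for i in lis:
--         r = dic[i][0]
--         lo, hi = 0, 16
--         while lo < hi:
--             mid = (lo + hi) // 2
--             if thresholds[mid] < r:
--                 lo = mid + 1
--             else:
--                 hi = mid
--         if lo < 16:
--             player_weight[i] = 16 - lo
--     return player_weight
-- ===== Notes on version B (the rewrite author's own statement) =====
-- stated objective: alternative
-- what changed: Replaces A's 16-branch comparison ladder with a precomputed boundary table [8,16,...,128] searched by a hand-written bisect_left binary-search loop; the found index gives the weight 16-idx and idx==16 means rank>128, left unassigned.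
import Mathlib
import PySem

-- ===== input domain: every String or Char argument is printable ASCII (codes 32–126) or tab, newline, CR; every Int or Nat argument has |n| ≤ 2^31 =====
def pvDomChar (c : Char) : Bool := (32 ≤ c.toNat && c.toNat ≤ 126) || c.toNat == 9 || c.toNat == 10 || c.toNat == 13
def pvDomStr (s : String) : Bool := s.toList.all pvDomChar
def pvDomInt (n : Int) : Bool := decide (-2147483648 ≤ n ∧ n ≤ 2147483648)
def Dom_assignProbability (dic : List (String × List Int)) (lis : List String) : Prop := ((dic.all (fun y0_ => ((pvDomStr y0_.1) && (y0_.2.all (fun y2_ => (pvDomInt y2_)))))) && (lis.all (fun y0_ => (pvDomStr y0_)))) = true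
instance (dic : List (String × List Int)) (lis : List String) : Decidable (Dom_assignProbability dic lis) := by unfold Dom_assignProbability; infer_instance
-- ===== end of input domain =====

-- B looks the rank up by hand-written binary search over the 16 bucket boundaries instead of A's 16-branch ladder; objective: alternative.


-- ===== PORT A =====
-- dic[i][0]; total stand-in (0) outside Pre_, where Python raises KeyError/IndexError
def pvRank0 (dic : List (String × List Int)) (i : String) : Int :=
  match PySem.Dict.get? (PySem.Dict.mk dic) i with
  | some l => (PySem.List.pyGet? l 0).getD 0
  | none => 0

def assignProbability (dic : List (String × List Int)) (lis : List String) : List (String × Int) :=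
  lis.foldl (fun player_weight i =>
    if pvRank0 dic i ≤ 8 then PySem.Dict.insert player_weight i 16
    else if 8 < pvRank0 dic i ∧ pvRank0 dic i ≤ 16 then PySem.Dict.insert player_weight i 15
    else if 16 < pvRank0 dic i ∧ pvRank0 dic i ≤ 24 then PySem.Dict.insert player_weight i 14
    else if 24 < pvRank0 dic i ∧ pvRank0 dic i ≤ 32 then PySem.Dict.insert player_weight i 13
    else if 32 < pvRank0 dic i ∧ pvRank0 dic i ≤ 40 then PySem.Dict.insert player_weight i 12
    else if 40 < pvRank0 dic i ∧ pvRank0 dic i ≤ 48 then PySem.Dict.insert player_weight i 11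
    else if 48 < pvRank0 dic i ∧ pvRank0 dic i ≤ 56 then PySem.Dict.insert player_weight i 10
    else if 56 < pvRank0 dic i ∧ pvRank0 dic i ≤ 64 then PySem.Dict.insert player_weight i 9
    else if 64 < pvRank0 dic i ∧ pvRank0 dic i ≤ 72 then PySem.Dict.insert player_weight i 8
    else if 72 < pvRank0 dic i ∧ pvRank0 dic i ≤ 80 then PySem.Dict.insert player_weight i 7
    else if 80 < pvRank0 dic i ∧ pvRank0 dic i ≤ 88 then PySem.Dict.insert player_weight i 6
    else if 88 < pvRank0 dic i ∧ pvRank0 dic i ≤ 96 then PySem.Dict.insert player_weight i 5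
    else if 96 < pvRank0 dic i ∧ pvRank0 dic i ≤ 104 then PySem.Dict.insert player_weight i 4
    else if 104 < pvRank0 dic i ∧ pvRank0 dic i ≤ 112 then PySem.Dict.insert player_weight i 3
    else if 112 < pvRank0 dic i ∧ pvRank0 dic i ≤ 120 then PySem.Dict.insert player_weight i 2
    else if 120 < pvRank0 dic i ∧ pvRank0 dic i ≤ 128 then PySem.Dict.insert player_weight i 1
    else player_weight) PySem.Dict.empty |>.items

-- ===== PORT B =====
def pvThresholds : List Int := [8, 16, 24, 32, 40, 48, 56, 64, 72, 80, 88, 96, 104, 112, 120, 128]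

-- hand-written bisect_left loop of Source B; getD is exact here since 0 ≤ (lo+hi)/2 < 16 whenever called
def pvBisect (r : Int) (lo hi : Nat) : Nat :=
  if lo < hi then
    if pvThresholds.getD ((lo + hi) / 2) 0 < r then pvBisect r ((lo + hi) / 2 + 1) hi
    else pvBisect r lo ((lo + hi) / 2)
  else lo
termination_by hi - lo
decreasing_by all_goals omega

def assignProbability_alt (dic : List (String × List Int)) (lis : List String) : List (String × Int) :=
  lis.foldl (fun player_weight i =>
    let r := pvRank0 dic i
    let lo := pvBisect r 0 16
    if lo < 16 then PySem.Dict.insert player_weight i (16 - (lo : Int))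
    else player_weight) PySem.Dict.empty |>.items

-- ===== PRECONDITION & SPEC =====
-- Pre_ excludes exactly the inputs where Python A raises: a name in lis missing from dic (KeyError)
-- or mapped to an empty list (IndexError on [0]).
def Pre_assignProbability (dic : List (String × List Int)) (lis : List String) : Prop :=
  ∀ i ∈ lis, ∃ p ∈ dic, p.1 = i ∧ p.2 ≠ []
instance (dic : List (String × List Int)) (lis : List String) : Decidable (Pre_assignProbability dic lis) := by unfold Pre_assignProbability; infer_instance

def pvWitness_assignProbability : (List (String × List Int)) × List String :=
  ([("alice", [3, 7]), ("bob", [130]), ("carl", [77])], ["alice", "carl", "alice"])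

def Spec_assignProbability (dic : List (String × List Int)) (lis : List String) (out : List (String × Int)) : Prop := out = assignProbability_alt dic lis
instance (dic : List (String × List Int)) (lis : List String) (out : List (String × Int)) : Decidable (Spec_assignProbability dic lis out) := by unfold Spec_assignProbability; infer_instance

-- ===== CLAIM (what is proved, stated in full; the proofs are below) =====
def Claim_equal_assignProbability : Prop := ∀ (dic : List (String × List Int)) (lis : List String), Dom_assignProbability dic lis → Pre_assignProbability dic lis → Spec_assignProbability dic lis (assignProbability dic lis)

-- ===== LEMMAS AND PROOFS =====

-- pvBisect evaluated on each of the 17 rank intervals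
theorem pvBis_0 (r : Int) (h2 : r ≤ 8) : pvBisect r 0 16 = 0 := by
  rw [pvBisect]; norm_num [pvThresholds]
  rw [if_neg (by omega : ¬ (72:Int) < r)]
  rw [pvBisect]; norm_num [pvThresholds]
  rw [if_neg (by omega : ¬ (40:Int) < r)]
  rw [pvBisect]; norm_num [pvThresholds]
  rw [if_neg (by omega : ¬ (24:Int) < r)]
  rw [pvBisect]; norm_num [pvThresholds]
  rw [if_neg (by omega : ¬ (16:Int) < r)]
  rw [pvBisect]; norm_num [pvThresholds]
  rw [if_neg (by omega : ¬ (8:Int) < r)]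
  rw [pvBisect]; norm_num

theorem pvBis_1 (r : Int) (h1 : 8 < r) (h2 : r ≤ 16) : pvBisect r 0 16 = 1 := by
  rw [pvBisect]; norm_num [pvThresholds]
  rw [if_neg (by omega : ¬ (72:Int) < r)]
  rw [pvBisect]; norm_num [pvThresholds]
  rw [if_neg (by omega : ¬ (40:Int) < r)]
  rw [pvBisect]; norm_num [pvThresholds]
  rw [if_neg (by omega : ¬ (24:Int) < r)]
  rw [pvBisect]; norm_num [pvThresholds]
  rw [if_neg (by omega : ¬ (16:Int) < r)]
  rw [pvBisect]; norm_num [pvThresholds]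
  rw [if_pos (by omega : (8:Int) < r)]
  rw [pvBisect]; norm_num

theorem pvBis_2 (r : Int) (h1 : 16 < r) (h2 : r ≤ 24) : pvBisect r 0 16 = 2 := by
  rw [pvBisect]; norm_num [pvThresholds]
  rw [if_neg (by omega : ¬ (72:Int) < r)]
  rw [pvBisect]; norm_num [pvThresholds]
  rw [if_neg (by omega : ¬ (40:Int) < r)]
  rw [pvBisect]; norm_num [pvThresholds]
  rw [if_neg (by omega : ¬ (24:Int) < r)]
  rw [pvBisect]; norm_num [pvThresholds]
  rw [if_pos (by omega : (16:Int) < r)]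
  rw [pvBisect]; norm_num

theorem pvBis_3 (r : Int) (h1 : 24 < r) (h2 : r ≤ 32) : pvBisect r 0 16 = 3 := by
  rw [pvBisect]; norm_num [pvThresholds]
  rw [if_neg (by omega : ¬ (72:Int) < r)]
  rw [pvBisect]; norm_num [pvThresholds]
  rw [if_neg (by omega : ¬ (40:Int) < r)]
  rw [pvBisect]; norm_num [pvThresholds]
  rw [if_pos (by omega : (24:Int) < r)]
  rw [pvBisect]; norm_num [pvThresholds]
  rw [if_neg (by omega : ¬ (32:Int) < r)]
  rw [pvBisect]; norm_num

theorem pvBis_4 (r : Int) (h1 : 32 < r) (h2 : r ≤ 40) : pvBisect r 0 16 = 4 := by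
  rw [pvBisect]; norm_num [pvThresholds]
  rw [if_neg (by omega : ¬ (72:Int) < r)]
  rw [pvBisect]; norm_num [pvThresholds]
  rw [if_neg (by omega : ¬ (40:Int) < r)]
  rw [pvBisect]; norm_num [pvThresholds]
  rw [if_pos (by omega : (24:Int) < r)]
  rw [pvBisect]; norm_num [pvThresholds]
  rw [if_pos (by omega : (32:Int) < r)]
  rw [pvBisect]; norm_num

theorem pvBis_5 (r : Int) (h1 : 40 < r) (h2 : r ≤ 48) : pvBisect r 0 16 = 5 := by
  rw [pvBisect]; norm_num [pvThresholds]
  rw [if_neg (by omega : ¬ (72:Int) < r)]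
  rw [pvBisect]; norm_num [pvThresholds]
  rw [if_pos (by omega : (40:Int) < r)]
  rw [pvBisect]; norm_num [pvThresholds]
  rw [if_neg (by omega : ¬ (56:Int) < r)]
  rw [pvBisect]; norm_num [pvThresholds]
  rw [if_neg (by omega : ¬ (48:Int) < r)]
  rw [pvBisect]; norm_num

theorem pvBis_6 (r : Int) (h1 : 48 < r) (h2 : r ≤ 56) : pvBisect r 0 16 = 6 := by
  rw [pvBisect]; norm_num [pvThresholds]
  rw [if_neg (by omega : ¬ (72:Int) < r)]
  rw [pvBisect]; norm_num [pvThresholds]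
  rw [if_pos (by omega : (40:Int) < r)]
  rw [pvBisect]; norm_num [pvThresholds]
  rw [if_neg (by omega : ¬ (56:Int) < r)]
  rw [pvBisect]; norm_num [pvThresholds]
  rw [if_pos (by omega : (48:Int) < r)]
  rw [pvBisect]; norm_num

theorem pvBis_7 (r : Int) (h1 : 56 < r) (h2 : r ≤ 64) : pvBisect r 0 16 = 7 := by
  rw [pvBisect]; norm_num [pvThresholds]
  rw [if_neg (by omega : ¬ (72:Int) < r)]
  rw [pvBisect]; norm_num [pvThresholds]
  rw [if_pos (by omega : (40:Int) < r)]
  rw [pvBisect]; norm_num [pvThresholds]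
  rw [if_pos (by omega : (56:Int) < r)]
  rw [pvBisect]; norm_num [pvThresholds]
  rw [if_neg (by omega : ¬ (64:Int) < r)]
  rw [pvBisect]; norm_num

theorem pvBis_8 (r : Int) (h1 : 64 < r) (h2 : r ≤ 72) : pvBisect r 0 16 = 8 := by
  rw [pvBisect]; norm_num [pvThresholds]
  rw [if_neg (by omega : ¬ (72:Int) < r)]
  rw [pvBisect]; norm_num [pvThresholds]
  rw [if_pos (by omega : (40:Int) < r)]
  rw [pvBisect]; norm_num [pvThresholds]
  rw [if_pos (by omega : (56:Int) < r)]
  rw [pvBisect]; norm_num [pvThresholds]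
  rw [if_pos (by omega : (64:Int) < r)]
  rw [pvBisect]; norm_num

theorem pvBis_9 (r : Int) (h1 : 72 < r) (h2 : r ≤ 80) : pvBisect r 0 16 = 9 := by
  rw [pvBisect]; norm_num [pvThresholds]
  rw [if_pos (by omega : (72:Int) < r)]
  rw [pvBisect]; norm_num [pvThresholds]
  rw [if_neg (by omega : ¬ (104:Int) < r)]
  rw [pvBisect]; norm_num [pvThresholds]
  rw [if_neg (by omega : ¬ (88:Int) < r)]
  rw [pvBisect]; norm_num [pvThresholds]
  rw [if_neg (by omega : ¬ (80:Int) < r)]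
  rw [pvBisect]; norm_num

theorem pvBis_10 (r : Int) (h1 : 80 < r) (h2 : r ≤ 88) : pvBisect r 0 16 = 10 := by
  rw [pvBisect]; norm_num [pvThresholds]
  rw [if_pos (by omega : (72:Int) < r)]
  rw [pvBisect]; norm_num [pvThresholds]
  rw [if_neg (by omega : ¬ (104:Int) < r)]
  rw [pvBisect]; norm_num [pvThresholds]
  rw [if_neg (by omega : ¬ (88:Int) < r)]
  rw [pvBisect]; norm_num [pvThresholds]
  rw [if_pos (by omega : (80:Int) < r)]
  rw [pvBisect]; norm_num

theorem pvBis_11 (r : Int) (h1 : 88 < r) (h2 : r ≤ 96) : pvBisect r 0 16 = 11 := by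
  rw [pvBisect]; norm_num [pvThresholds]
  rw [if_pos (by omega : (72:Int) < r)]
  rw [pvBisect]; norm_num [pvThresholds]
  rw [if_neg (by omega : ¬ (104:Int) < r)]
  rw [pvBisect]; norm_num [pvThresholds]
  rw [if_pos (by omega : (88:Int) < r)]
  rw [pvBisect]; norm_num [pvThresholds]
  rw [if_neg (by omega : ¬ (96:Int) < r)]
  rw [pvBisect]; norm_num

theorem pvBis_12 (r : Int) (h1 : 96 < r) (h2 : r ≤ 104) : pvBisect r 0 16 = 12 := by
  rw [pvBisect]; norm_num [pvThresholds]
  rw [if_pos (by omega : (72:Int) < r)]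
  rw [pvBisect]; norm_num [pvThresholds]
  rw [if_neg (by omega : ¬ (104:Int) < r)]
  rw [pvBisect]; norm_num [pvThresholds]
  rw [if_pos (by omega : (88:Int) < r)]
  rw [pvBisect]; norm_num [pvThresholds]
  rw [if_pos (by omega : (96:Int) < r)]
  rw [pvBisect]; norm_num

theorem pvBis_13 (r : Int) (h1 : 104 < r) (h2 : r ≤ 112) : pvBisect r 0 16 = 13 := by
  rw [pvBisect]; norm_num [pvThresholds]
  rw [if_pos (by omega : (72:Int) < r)]
  rw [pvBisect]; norm_num [pvThresholds]
  rw [if_pos (by omega : (104:Int) < r)]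
  rw [pvBisect]; norm_num [pvThresholds]
  rw [if_neg (by omega : ¬ (120:Int) < r)]
  rw [pvBisect]; norm_num [pvThresholds]
  rw [if_neg (by omega : ¬ (112:Int) < r)]
  rw [pvBisect]; norm_num

theorem pvBis_14 (r : Int) (h1 : 112 < r) (h2 : r ≤ 120) : pvBisect r 0 16 = 14 := by
  rw [pvBisect]; norm_num [pvThresholds]
  rw [if_pos (by omega : (72:Int) < r)]
  rw [pvBisect]; norm_num [pvThresholds]
  rw [if_pos (by omega : (104:Int) < r)]
  rw [pvBisect]; norm_num [pvThresholds]
  rw [if_neg (by omega : ¬ (120:Int) < r)]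
  rw [pvBisect]; norm_num [pvThresholds]
  rw [if_pos (by omega : (112:Int) < r)]
  rw [pvBisect]; norm_num

theorem pvBis_15 (r : Int) (h1 : 120 < r) (h2 : r ≤ 128) : pvBisect r 0 16 = 15 := by
  rw [pvBisect]; norm_num [pvThresholds]
  rw [if_pos (by omega : (72:Int) < r)]
  rw [pvBisect]; norm_num [pvThresholds]
  rw [if_pos (by omega : (104:Int) < r)]
  rw [pvBisect]; norm_num [pvThresholds]
  rw [if_pos (by omega : (120:Int) < r)]
  rw [pvBisect]; norm_num [pvThresholds]
  rw [if_neg (by omega : ¬ (128:Int) < r)]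
  rw [pvBisect]; norm_num

theorem pvBis_16 (r : Int) (h1 : 128 < r) : pvBisect r 0 16 = 16 := by
  rw [pvBisect]; norm_num [pvThresholds]
  rw [if_pos (by omega : (72:Int) < r)]
  rw [pvBisect]; norm_num [pvThresholds]
  rw [if_pos (by omega : (104:Int) < r)]
  rw [pvBisect]; norm_num [pvThresholds]
  rw [if_pos (by omega : (120:Int) < r)]
  rw [pvBisect]; norm_num [pvThresholds]
  rw [if_pos (by omega : (128:Int) < r)]
  rw [pvBisect]; norm_num


-- the per-player steps agree: the ladder's bucket is exactly 16 - bisect index (omitted when the index is 16)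
set_option maxHeartbeats 1000000 in
theorem pv_step_eq (dic : List (String × List Int)) (i : String)
    (pw : PySem.Dict String Int) :
    (    if pvRank0 dic i ≤ 8 then PySem.Dict.insert pw i 16
    else if 8 < pvRank0 dic i ∧ pvRank0 dic i ≤ 16 then PySem.Dict.insert pw i 15
    else if 16 < pvRank0 dic i ∧ pvRank0 dic i ≤ 24 then PySem.Dict.insert pw i 14
    else if 24 < pvRank0 dic i ∧ pvRank0 dic i ≤ 32 then PySem.Dict.insert pw i 13
    else if 32 < pvRank0 dic i ∧ pvRank0 dic i ≤ 40 then PySem.Dict.insert pw i 12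
    else if 40 < pvRank0 dic i ∧ pvRank0 dic i ≤ 48 then PySem.Dict.insert pw i 11
    else if 48 < pvRank0 dic i ∧ pvRank0 dic i ≤ 56 then PySem.Dict.insert pw i 10
    else if 56 < pvRank0 dic i ∧ pvRank0 dic i ≤ 64 then PySem.Dict.insert pw i 9
    else if 64 < pvRank0 dic i ∧ pvRank0 dic i ≤ 72 then PySem.Dict.insert pw i 8
    else if 72 < pvRank0 dic i ∧ pvRank0 dic i ≤ 80 then PySem.Dict.insert pw i 7
    else if 80 < pvRank0 dic i ∧ pvRank0 dic i ≤ 88 then PySem.Dict.insert pw i 6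
    else if 88 < pvRank0 dic i ∧ pvRank0 dic i ≤ 96 then PySem.Dict.insert pw i 5
    else if 96 < pvRank0 dic i ∧ pvRank0 dic i ≤ 104 then PySem.Dict.insert pw i 4
    else if 104 < pvRank0 dic i ∧ pvRank0 dic i ≤ 112 then PySem.Dict.insert pw i 3
    else if 112 < pvRank0 dic i ∧ pvRank0 dic i ≤ 120 then PySem.Dict.insert pw i 2
    else if 120 < pvRank0 dic i ∧ pvRank0 dic i ≤ 128 then PySem.Dict.insert pw i 1
    else pw) =
    (let r := pvRank0 dic i
     let lo := pvBisect r 0 16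
     if lo < 16 then PySem.Dict.insert pw i (16 - (lo : Int)) else pw) := by
  generalize pvRank0 dic i = r
  by_cases h1 : r ≤ 8
  · rw [if_pos h1]
    simp only [pvBis_0 r h1]
    norm_num
  by_cases h2 : 8 < r ∧ r ≤ 16
  · rw [if_neg h1, if_pos h2]
    simp only [pvBis_1 r h2.1 h2.2]
    norm_num
  by_cases h3 : 16 < r ∧ r ≤ 24
  · rw [if_neg h1, if_neg h2, if_pos h3]
    simp only [pvBis_2 r h3.1 h3.2]
    norm_num
  by_cases h4 : 24 < r ∧ r ≤ 32
  · rw [if_neg h1, if_neg h2, if_neg h3, if_pos h4]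
    simp only [pvBis_3 r h4.1 h4.2]
    norm_num
  by_cases h5 : 32 < r ∧ r ≤ 40
  · rw [if_neg h1, if_neg h2, if_neg h3, if_neg h4, if_pos h5]
    simp only [pvBis_4 r h5.1 h5.2]
    norm_num
  by_cases h6 : 40 < r ∧ r ≤ 48
  · rw [if_neg h1, if_neg h2, if_neg h3, if_neg h4, if_neg h5, if_pos h6]
    simp only [pvBis_5 r h6.1 h6.2]
    norm_num
  by_cases h7 : 48 < r ∧ r ≤ 56
  · rw [if_neg h1, if_neg h2, if_neg h3, if_neg h4, if_neg h5, if_neg h6, if_pos h7]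
    simp only [pvBis_6 r h7.1 h7.2]
    norm_num
  by_cases h8 : 56 < r ∧ r ≤ 64
  · rw [if_neg h1, if_neg h2, if_neg h3, if_neg h4, if_neg h5, if_neg h6, if_neg h7, if_pos h8]
    simp only [pvBis_7 r h8.1 h8.2]
    norm_num
  by_cases h9 : 64 < r ∧ r ≤ 72
  · rw [if_neg h1, if_neg h2, if_neg h3, if_neg h4, if_neg h5, if_neg h6, if_neg h7, if_neg h8, if_pos h9]
    simp only [pvBis_8 r h9.1 h9.2]
    norm_num
  by_cases h10 : 72 < r ∧ r ≤ 80
  · rw [if_neg h1, if_neg h2, if_neg h3, if_neg h4, if_neg h5, if_neg h6, if_neg h7, if_neg h8, if_neg h9, if_pos h10]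
    simp only [pvBis_9 r h10.1 h10.2]
    norm_num
  by_cases h11 : 80 < r ∧ r ≤ 88
  · rw [if_neg h1, if_neg h2, if_neg h3, if_neg h4, if_neg h5, if_neg h6, if_neg h7, if_neg h8, if_neg h9, if_neg h10, if_pos h11]
    simp only [pvBis_10 r h11.1 h11.2]
    norm_num
  by_cases h12 : 88 < r ∧ r ≤ 96
  · rw [if_neg h1, if_neg h2, if_neg h3, if_neg h4, if_neg h5, if_neg h6, if_neg h7, if_neg h8, if_neg h9, if_neg h10, if_neg h11, if_pos h12]
    simp only [pvBis_11 r h12.1 h12.2]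
    norm_num
  by_cases h13 : 96 < r ∧ r ≤ 104
  · rw [if_neg h1, if_neg h2, if_neg h3, if_neg h4, if_neg h5, if_neg h6, if_neg h7, if_neg h8, if_neg h9, if_neg h10, if_neg h11, if_neg h12, if_pos h13]
    simp only [pvBis_12 r h13.1 h13.2]
    norm_num
  by_cases h14 : 104 < r ∧ r ≤ 112
  · rw [if_neg h1, if_neg h2, if_neg h3, if_neg h4, if_neg h5, if_neg h6, if_neg h7, if_neg h8, if_neg h9, if_neg h10, if_neg h11, if_neg h12, if_neg h13, if_pos h14]
    simp only [pvBis_13 r h14.1 h14.2]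
    norm_num
  by_cases h15 : 112 < r ∧ r ≤ 120
  · rw [if_neg h1, if_neg h2, if_neg h3, if_neg h4, if_neg h5, if_neg h6, if_neg h7, if_neg h8, if_neg h9, if_neg h10, if_neg h11, if_neg h12, if_neg h13, if_neg h14, if_pos h15]
    simp only [pvBis_14 r h15.1 h15.2]
    norm_num
  by_cases h16 : 120 < r ∧ r ≤ 128
  · rw [if_neg h1, if_neg h2, if_neg h3, if_neg h4, if_neg h5, if_neg h6, if_neg h7, if_neg h8, if_neg h9, if_neg h10, if_neg h11, if_neg h12, if_neg h13, if_neg h14, if_neg h15, if_pos h16]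
    simp only [pvBis_15 r h16.1 h16.2]
    norm_num
  · rw [if_neg h1, if_neg h2, if_neg h3, if_neg h4, if_neg h5, if_neg h6, if_neg h7, if_neg h8, if_neg h9, if_neg h10, if_neg h11, if_neg h12, if_neg h13, if_neg h14, if_neg h15, if_neg h16]
    simp only [pvBis_16 r (by omega)]
    norm_num

theorem pv_fold_eq (dic : List (String × List Int)) (lis : List String)
    (pw : PySem.Dict String Int) :
    lis.foldl (fun pw i =>
      if pvRank0 dic i ≤ 8 then PySem.Dict.insert pw i 16
      else if 8 < pvRank0 dic i ∧ pvRank0 dic i ≤ 16 then PySem.Dict.insert pw i 15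
      else if 16 < pvRank0 dic i ∧ pvRank0 dic i ≤ 24 then PySem.Dict.insert pw i 14
      else if 24 < pvRank0 dic i ∧ pvRank0 dic i ≤ 32 then PySem.Dict.insert pw i 13
      else if 32 < pvRank0 dic i ∧ pvRank0 dic i ≤ 40 then PySem.Dict.insert pw i 12
      else if 40 < pvRank0 dic i ∧ pvRank0 dic i ≤ 48 then PySem.Dict.insert pw i 11
      else if 48 < pvRank0 dic i ∧ pvRank0 dic i ≤ 56 then PySem.Dict.insert pw i 10
      else if 56 < pvRank0 dic i ∧ pvRank0 dic i ≤ 64 then PySem.Dict.insert pw i 9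
      else if 64 < pvRank0 dic i ∧ pvRank0 dic i ≤ 72 then PySem.Dict.insert pw i 8
      else if 72 < pvRank0 dic i ∧ pvRank0 dic i ≤ 80 then PySem.Dict.insert pw i 7
      else if 80 < pvRank0 dic i ∧ pvRank0 dic i ≤ 88 then PySem.Dict.insert pw i 6
      else if 88 < pvRank0 dic i ∧ pvRank0 dic i ≤ 96 then PySem.Dict.insert pw i 5
      else if 96 < pvRank0 dic i ∧ pvRank0 dic i ≤ 104 then PySem.Dict.insert pw i 4
      else if 104 < pvRank0 dic i ∧ pvRank0 dic i ≤ 112 then PySem.Dict.insert pw i 3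
      else if 112 < pvRank0 dic i ∧ pvRank0 dic i ≤ 120 then PySem.Dict.insert pw i 2
      else if 120 < pvRank0 dic i ∧ pvRank0 dic i ≤ 128 then PySem.Dict.insert pw i 1
      else pw) pw =
    lis.foldl (fun pw i =>
      let r := pvRank0 dic i
      let lo := pvBisect r 0 16
      if lo < 16 then PySem.Dict.insert pw i (16 - (lo : Int)) else pw) pw := by
  induction lis generalizing pw with
  | nil => rfl
  | cons x xs ih =>
      simp only [List.foldl_cons]
      rw [pv_step_eq]
      exact ih _

-- ===== VERDICT (by name: the statement is the Claim_ definition above) =====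
theorem assignProbability_spec : Claim_equal_assignProbability := by
  intro dic lis _ _
  unfold Spec_assignProbability assignProbability assignProbability_alt
  rw [pv_fold_eq]
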